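-- pv_equiv track=rewrite | github.com/vikassalaria2412/DataStructureProblemStatements | Arrays/MatricesPractices.py | matrices
-- ===== SOURCE A (Python) =====
-- def matrices(A):
--     n = len(A)
--     m = len(A[0])
--     C = [[0] * m for _ in range(n)]
--     for i in range(n):
--         for j in range(m):
--             v = (j + 1) ** (i + 1)
--             C[i][j] = v
--
--     return C
-- ===== SOURCE B (Python) =====
-- def matrices(A):
--     n = len(A)
--     m = len(A[0])
--     C = []
--     row = [1] * m
--     for _ in range(n):
--         row = [row[j] * (j + 1) for j in range(m)]
--         C.append(row)
--     return C
-- ===== Notes on version B (the rewrite author's own statement) =====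
-- stated objective: faster
-- what changed: B builds each row incrementally as the previous row multiplied elementwise by (j+1), one bignum multiplication per cell, instead of computing (j+1)**(i+1) from scratch for every cell.
import Mathlib
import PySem

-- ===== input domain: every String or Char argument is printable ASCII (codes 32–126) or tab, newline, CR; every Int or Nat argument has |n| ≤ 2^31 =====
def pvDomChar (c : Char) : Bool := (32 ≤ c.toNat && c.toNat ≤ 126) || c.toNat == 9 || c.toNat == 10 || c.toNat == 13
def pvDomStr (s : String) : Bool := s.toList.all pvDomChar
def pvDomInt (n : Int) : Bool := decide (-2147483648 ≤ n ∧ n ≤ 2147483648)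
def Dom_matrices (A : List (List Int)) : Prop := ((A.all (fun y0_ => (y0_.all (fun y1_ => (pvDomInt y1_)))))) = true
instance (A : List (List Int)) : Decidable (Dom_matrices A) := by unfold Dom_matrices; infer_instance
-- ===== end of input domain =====

-- B replaces per-cell exponentiation (j+1)**(i+1) by building each row as the previous
-- row times (j+1), one multiplication per cell (objective: faster; measured by the check).

-- ===== PORT A =====
-- n = len(A); m = len(A[0]); C = [[0]*m for _ in range(n)];
-- for i in range(n): for j in range(m): v = (j+1)**(i+1); C[i][j] = v
def matrices (A : List (List Int)) : List (List Int) :=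
  let n := A.length
  let m := ((PySem.List.pyGet? A 0).getD []).length   -- A[0]; Pre_ excludes A = []
  let C0 := List.replicate n (List.replicate m (0 : Int))
  (List.range n).foldl (fun C (i : Nat) =>
    (List.range m).foldl (fun C (j : Nat) =>
      let v : Int := ((j : Int) + 1) ^ (i + 1)
      C.set i ((C.getD i []).set j v)) C) C0

-- ===== PORT B =====
-- row = [1]*m; n times: row = [row[j]*(j+1) for j in range(m)]; C.append(row)
def matGo (m : Nat) : Nat → List Int → List (List Int)
  | 0, _ => []
  | k + 1, row =>
    let row' := (List.range m).map (fun (j : Nat) => row.getD j 0 * ((j : Int) + 1))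
    row' :: matGo m k row'

def matrices_alt (A : List (List Int)) : List (List Int) :=
  let n := A.length
  let m := ((PySem.List.pyGet? A 0).getD []).length   -- A[0]
  matGo m n (List.replicate m (1 : Int))

-- ===== PRECONDITION & SPEC =====
-- Pre_ excludes only the empty list, on which Python A raises IndexError at A[0].
def Pre_matrices (A : List (List Int)) : Prop := A ≠ []
instance (A : List (List Int)) : Decidable (Pre_matrices A) := by unfold Pre_matrices; infer_instance
def pvWitness_matrices : List (List Int) := [[0, 0], [0, 0], [0, 0]]

def Spec_matrices (A : List (List Int)) (out : List (List Int)) : Prop := out = matrices_alt A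
instance (A : List (List Int)) (out : List (List Int)) : Decidable (Spec_matrices A out) := by unfold Spec_matrices; infer_instance

-- ===== CLAIM (what is proved, stated in full; the proofs are below) =====
def Claim_equal_matrices : Prop := ∀ (A : List (List Int)), Dom_matrices A → Pre_matrices A → Spec_matrices A (matrices A)

-- ===== LEMMAS AND PROOFS =====

-- the canonical row: [(1)^e, (2)^e, …, (m)^e]
def rowpow (m e : Nat) : List Int := (List.range m).map (fun (j : Nat) => ((j : Int) + 1) ^ e)

theorem set_append_len {α : Type} (a : List α) (x v : α) (b : List α) :
    (a ++ x :: b).set a.length v = a ++ v :: b := by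
  induction a with
  | nil => rfl
  | cons h t ih => simp [ih]

theorem getD_append_len {α : Type} (a : List α) (x d : α) (b : List α) :
    (a ++ x :: b).getD a.length d = x := by
  simp [List.getD]

-- the inner cell-writing fold on a single row
theorem setfold (f : Nat → Int) :
    ∀ (k : Nat) (row : List Int), k ≤ row.length →
      (List.range k).foldl (fun r j => r.set j (f j)) row
        = (List.range k).map f ++ row.drop k := by
  intro k
  induction k with
  | zero => simp
  | succ k ih =>
    intro row hk
    rw [List.range_succ, List.foldl_append, List.map_append]
    have hk' : k ≤ row.length := Nat.le_of_succ_le hk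
    rw [ih row hk']
    obtain ⟨x, hx⟩ : ∃ x, row.drop k = x :: row.drop (k + 1) :=
      ⟨row[k], (List.drop_eq_getElem_cons (by omega)).trans rfl⟩
    rw [hx]
    have hlen : ((List.range k).map f).length = k := by simp
    simp only [List.foldl_cons, List.foldl_nil]
    have h2 := set_append_len ((List.range k).map f) x (f k) (row.drop (k + 1))
    rw [hlen] at h2
    rw [h2]
    simp

-- the inner fold over j, lifted to the matrix: it only rewrites row i
theorem inner_fold (f : Nat → Int) (m : Nat) :
    ∀ (C : List (List Int)) (i : Nat), i < C.length →
      (List.range m).foldl (fun C j => C.set i ((C.getD i []).set j (f j))) C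
        = C.set i ((List.range m).foldl (fun r j => r.set j (f j)) (C.getD i [])) := by
  induction m with
  | zero => intro C i hi; simp [List.getD, List.getElem?_eq_getElem hi, List.set_getElem_self]
  | succ m ih =>
    intro C i hi
    rw [List.range_succ, List.foldl_append, List.foldl_append, ih C i hi]
    have hlen : (C.set i ((List.range m).foldl (fun r j => r.set j (f j)) (C.getD i []))).length = C.length := by simp
    simp only [List.foldl_cons, List.foldl_nil]
    rw [List.set_set]
    congr 1
    have : (C.set i ((List.range m).foldl (fun r j => r.set j (f j)) (C.getD i []))).getD i []
        = (List.range m).foldl (fun r j => r.set j (f j)) (C.getD i []) := by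
      simp [List.getD, List.getElem?_set_self hi]
    rw [this]

-- A's outer loop, characterised
theorem outer_fold (n m : Nat) :
    ∀ k, k ≤ n →
      (List.range k).foldl (fun C (i : Nat) =>
          (List.range m).foldl (fun C (j : Nat) =>
            C.set i ((C.getD i []).set j (((j : Int) + 1) ^ (i + 1))) ) C)
        (List.replicate n (List.replicate m (0 : Int)))
      = (List.range k).map (fun i => rowpow m (i + 1))
          ++ List.replicate (n - k) (List.replicate m (0 : Int)) := by
  intro k
  induction k with
  | zero => simp
  | succ k ih =>
    intro hk
    have hk' : k ≤ n := Nat.le_of_succ_le hk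
    rw [List.range_succ, List.foldl_append, ih hk']
    set P := (List.range k).map (fun i => rowpow m (i + 1)) with hP
    have hPlen : P.length = k := by simp [hP]
    have hrep : List.replicate (n - k) (List.replicate m (0 : Int))
        = List.replicate m (0 : Int) :: List.replicate (n - (k + 1)) (List.replicate m (0 : Int)) := by
      have : n - k = (n - (k + 1)) + 1 := by omega
      rw [this, List.replicate_succ]
    rw [hrep]
    have hlen : (P ++ List.replicate m (0:Int) :: List.replicate (n - (k+1)) (List.replicate m (0:Int))).length = n := by
      simp [hPlen]; omega
    simp only [List.foldl_cons, List.foldl_nil]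
    rw [inner_fold _ m _ k (by rw [hlen]; omega)]
    have h3 := getD_append_len P (List.replicate m (0:Int)) []
      (List.replicate (n - (k+1)) (List.replicate m (0:Int)))
    rw [hPlen] at h3
    rw [h3, setfold _ m _ (by simp)]
    have hdm : (List.replicate m (0:Int)).drop m = [] := by simp
    rw [hdm, List.append_nil]
    have h2 := set_append_len P (List.replicate m (0:Int))
      ((List.range m).map (fun (j : Nat) => ((j : Int) + 1) ^ (k + 1)))
      (List.replicate (n - (k+1)) (List.replicate m (0:Int)))
    rw [hPlen] at h2
    rw [h2, List.map_append, hP]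
    simp only [List.map_cons, List.map_nil, List.append_assoc, List.cons_append, List.nil_append]
    rfl

-- B's recursion, characterised
theorem rowpow_getD (m e i : Nat) (h : i < m) : (rowpow m e).getD i 0 = ((i : Int) + 1) ^ e := by
  simp [rowpow, List.getD, h]

theorem matGo_spec (m : Nat) :
    ∀ (k e : Nat), matGo m k (rowpow m e) = (List.range k).map (fun i => rowpow m (e + 1 + i)) := by
  intro k
  induction k with
  | zero => intro e; simp [matGo]
  | succ k ih =>
    intro e
    have hrow : (List.range m).map (fun j => (rowpow m e).getD j 0 * ((j : Int) + 1))
        = rowpow m (e + 1) := by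
      unfold rowpow
      apply List.map_congr_left
      intro j hj
      have hg := rowpow_getD m e j (List.mem_range.mp hj)
      unfold rowpow at hg
      rw [hg]
      exact (pow_succ _ e).symm
    rw [matGo, hrow, ih (e + 1), List.range_succ_eq_map]
    simp only [List.map_cons, List.map_map]
    refine congrArg₂ List.cons rfl ?_
    apply List.map_congr_left
    intro a _
    show rowpow m (e + 1 + 1 + a) = rowpow m (e + 1 + (a + 1))
    congr 1
    omega

theorem replicate_one_eq_rowpow (m : Nat) : List.replicate m (1 : Int) = rowpow m 0 := by
  apply List.ext_getElem (by simp [rowpow])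
  intro i h1 h2
  simp [rowpow]

-- ===== VERDICT (by name: the statement is the Claim_ definition above) =====
theorem matrices_spec : Claim_equal_matrices := by
  intro A _ _
  simp only [Spec_matrices, matrices, matrices_alt]
  rw [outer_fold A.length _ A.length (Nat.le_refl _), replicate_one_eq_rowpow, matGo_spec]
  simp only [Nat.sub_self, List.replicate_zero, List.append_nil]
  apply List.map_congr_left
  intro i _
  congr 1
  omega
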